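-- pv_equiv track=rewrite | github.com/Fortunoxx/AdventOfCode2024 | src/day08.py | calculate_antinode_locations_part2
-- ===== SOURCE A (Python) =====
-- def calculate_antinode_locations_part2(locations, width, height):
--     result = []
--     for location1 in locations:
--         if location1 not in result:
--             result.append(location1)
--         for location2 in locations:
--             if location2 not in result:
--                 result.append(location2)
--             if location1 == location2:
--                 continue
--             antinode_locations = calculate_antinode_location_part2(location1, location2, width, height)
--             for location in antinode_locations:
--                 if location not in result:
--                     result.append(location)
--     return result
--
-- def calc_next(location1, location2, i=0):
--     return (
--         location1[0] - (location1[0] - location2[0]) * (i + 1),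
--         location1[1] - (location1[1] - location2[1]) * (i + 1),
--     )
--
-- def calculate_antinode_location_part2(location1, location2, max_x, max_y):
--     loc = []
--
--     i = 1
--     next = calc_next(location1, location2)
--     while next[0] >= 0 and next[0] < max_x and next[1] >= 0 and next[1] < max_y:
--         loc.append(next)
--         next = calc_next(location1, location2, i)
--         i += 1
--
--     i = 1
--     next = calc_next(location2, location1)
--     while next[0] >= 0 and next[0] < max_x and next[1] >= 0 and next[1] < max_y:
--         loc.append(next)
--         next = calc_next(location2, location1, i)
--         i += 1
--
--     return loc
-- ===== SOURCE B (Python) =====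
-- def _ub(a, d, bnd):
--     # largest k (>= 1) keeping coordinate a - d*k inside [0, bnd), or None if d == 0
--     if d > 0:
--         return a // d
--     if d < 0:
--         return (bnd - 1 - a) // (-d)
--     return None
--
--
-- def _ray(l1, l2, width, height):
--     # antinodes l1 - k*(l1-l2) for k = 1, 2, ... while inside the grid, in closed form
--     x1, y1 = l1
--     dx, dy = x1 - l2[0], y1 - l2[1]
--     if not (0 <= x1 - dx < width and 0 <= y1 - dy < height):
--         return []
--     ks = [k for k in (_ub(x1, dx, width), _ub(y1, dy, height)) if k is not None]
--     last = min(ks)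
--     return [(x1 - dx * k, y1 - dy * k) for k in range(1, last + 1)]
--
--
-- def _stream(locations, width, height):
--     for location1 in locations:
--         yield location1
--         for location2 in locations:
--             yield location2
--             if location1 != location2:
--                 yield from _ray(location1, location2, width, height)
--                 yield from _ray(location2, location1, width, height)
--
--
-- def calculate_antinode_locations_part2(locations, width, height):
--     return list(dict.fromkeys(_stream(locations, width, height)))
-- ===== Notes on version B (the rewrite author's own statement) =====
-- stated objective: faster
-- what changed: B replaces A's step-by-step while loops by a closed-form floor-division bound that emits each in-grid antinode run as a single range, and replaces A's interleaved 'if not in result: append' linear-scan dedup by one flat generation pass followed by an order-preserving dict.fromkeys hash dedup.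
import Mathlib
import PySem

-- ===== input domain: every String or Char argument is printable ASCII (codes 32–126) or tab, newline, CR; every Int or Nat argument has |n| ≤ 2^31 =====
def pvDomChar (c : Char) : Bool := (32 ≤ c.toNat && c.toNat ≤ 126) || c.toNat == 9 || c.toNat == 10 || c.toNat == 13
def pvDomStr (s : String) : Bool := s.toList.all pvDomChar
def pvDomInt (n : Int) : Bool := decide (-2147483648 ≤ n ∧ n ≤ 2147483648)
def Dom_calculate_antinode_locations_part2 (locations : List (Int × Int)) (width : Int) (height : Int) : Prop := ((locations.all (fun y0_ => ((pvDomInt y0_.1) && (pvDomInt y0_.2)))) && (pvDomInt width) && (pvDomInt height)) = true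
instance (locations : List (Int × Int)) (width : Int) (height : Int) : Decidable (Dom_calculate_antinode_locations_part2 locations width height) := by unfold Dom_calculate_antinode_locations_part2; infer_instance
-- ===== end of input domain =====

-- B replaces A's step-by-step while loops by a closed-form arithmetic count of in-grid antinodes
-- and A's interleaved linear-scan membership dedup by one flat generation pass followed by dict.fromkeys (objective: faster, measured).

-- ===== PORT A =====
def calcNext (l1 l2 : Int × Int) (i : Int) : Int × Int :=
  (l1.1 - (l1.1 - l2.1) * (i + 1), l1.2 - (l1.2 - l2.2) * (i + 1))

-- Python's unbounded `while` ported with a fuel counter (totality only; A's caller guarantees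
-- l1 ≠ l2, under which the fuel below is proved sufficient)
def whileA (l1 l2 : Int × Int) (w h : Int) : Nat → Int → Int × Int → List (Int × Int) → List (Int × Int)
  | 0, _, _, loc => loc
  | fuel+1, i, next, loc =>
    if 0 ≤ next.1 ∧ next.1 < w ∧ 0 ≤ next.2 ∧ next.2 < h then
      whileA l1 l2 w h fuel (i + 1) (calcNext l1 l2 i) (loc ++ [next])
    else loc

def antinodeFuel (w h : Int) : Nat := w.toNat + h.toNat + 1

def calculate_antinode_location_part2 (l1 l2 : Int × Int) (max_x max_y : Int) : List (Int × Int) :=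
  let loc := whileA l1 l2 max_x max_y (antinodeFuel max_x max_y) 1 (calcNext l1 l2 0) []
  whileA l2 l1 max_x max_y (antinodeFuel max_x max_y) 1 (calcNext l2 l1 0) loc

def calculate_antinode_locations_part2 (locations : List (Int × Int)) (width : Int) (height : Int) : List (Int × Int) :=
  locations.foldl (fun result location1 =>
    let result := if location1 ∈ result then result else result ++ [location1]
    locations.foldl (fun result location2 =>
      let result := if location2 ∈ result then result else result ++ [location2]
      if location1 = location2 then result
      else (calculate_antinode_location_part2 location1 location2 width height).foldl
             (fun result location => if location ∈ result then result else result ++ [location])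
             result)
      result) []

-- ===== PORT B =====
def ub? (a d bnd : Int) : Option Int :=
  if 0 < d then some (PySem.Int.floordiv a d)
  else if d < 0 then some (PySem.Int.floordiv (bnd - 1 - a) (-d))
  else none

-- _ray: closed-form list of antinodes in one direction; `none` branch of min? is Python's
-- min([]) ValueError, unreachable because _ray is only called with l1 ≠ l2
def rayB (l1 l2 : Int × Int) (width height : Int) : List (Int × Int) :=
  let x1 := l1.1; let y1 := l1.2
  let dx := x1 - l2.1; let dy := y1 - l2.2
  if 0 ≤ x1 - dx ∧ x1 - dx < width ∧ 0 ≤ y1 - dy ∧ y1 - dy < height then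
    let ks := (ub? x1 dx width).toList ++ (ub? y1 dy height).toList
    match PySem.List.min? ks (fun k => k) with
    | some last => (PySem.List.pyRange 1 (last + 1) 1).map (fun k => (x1 - dx * k, y1 - dy * k))
    | none => []
  else []

-- _stream: the generator's yielded values, in order (exact: a generator consumed by list())
def streamB (locations : List (Int × Int)) (width height : Int) : List (Int × Int) :=
  locations.flatMap (fun location1 =>
    location1 :: locations.flatMap (fun location2 =>
      location2 :: (if location1 = location2 then []
                    else rayB location1 location2 width height ++ rayB location2 location1 width height)))

def calculate_antinode_locations_part2_alt (locations : List (Int × Int)) (width : Int) (height : Int) : List (Int × Int) :=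
  PySem.List.dedup (streamB locations width height)

-- ===== PRECONDITION & SPEC =====
def Spec_calculate_antinode_locations_part2 (locations : List (Int × Int)) (width : Int) (height : Int) (out : List (Int × Int)) : Prop := out = calculate_antinode_locations_part2_alt locations width height
instance (locations : List (Int × Int)) (width : Int) (height : Int) (out : List (Int × Int)) : Decidable (Spec_calculate_antinode_locations_part2 locations width height out) := by unfold Spec_calculate_antinode_locations_part2; infer_instance

-- ===== CLAIM (what is proved, stated in full; the proofs are below) =====
def Claim_equal_calculate_antinode_locations_part2 : Prop := ∀ (locations : List (Int × Int)) (width : Int) (height : Int), Dom_calculate_antinode_locations_part2 locations width height → Spec_calculate_antinode_locations_part2 locations width height (calculate_antinode_locations_part2 locations width height)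

-- ===== LEMMAS AND PROOFS =====

-- the k-th point on the ray from l1 away from l2
def rayPt (l1 l2 : Int × Int) (k : Int) : Int × Int :=
  (l1.1 - (l1.1 - l2.1) * k, l1.2 - (l1.2 - l2.2) * k)

-- one coordinate: for k ≥ 1 the in-bounds condition is exactly "k below the closed-form bound"
theorem coord_iff (a d bnd k : Int) (h1 : 0 ≤ a - d ∧ a - d < bnd) (hk : 1 ≤ k) :
    (0 ≤ a - d * k ∧ a - d * k < bnd) ↔ ∀ u ∈ ub? a d bnd, k ≤ u := by
  unfold ub?
  rcases lt_trichotomy d 0 with hd | hd | hd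
  · rw [if_neg (by omega), if_pos hd]
    simp only [Option.mem_def, Option.some.injEq, forall_eq']
    rw [PySem.Int.le_floordiv_iff_mul_le (hb := by omega)]
    have he : -d * 1 ≤ -d * k := mul_le_mul_of_nonneg_left hk (by omega)
    constructor
    · intro h; nlinarith [h.2]
    · intro h; constructor <;> nlinarith [h1.1, h1.2]
  · subst hd; simp only [lt_irrefl, if_false]
    simp only [Option.not_mem_none, false_implies, forall_const, iff_true]
    constructor <;> [skip; skip] <;> nlinarith [h1.1, h1.2]
  · rw [if_pos hd]
    simp only [Option.mem_def, Option.some.injEq, forall_eq']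
    rw [PySem.Int.le_floordiv_iff_mul_le (hb := hd)]
    have he : d * 1 ≤ d * k := mul_le_mul_of_nonneg_left hk (by omega)
    constructor
    · intro h; nlinarith [h.1]
    · intro h; constructor <;> nlinarith [h1.1, h1.2]

theorem coord_ub_le (a d bnd : Int) (h1 : 0 ≤ a - d ∧ a - d < bnd) :
    ∀ u ∈ ub? a d bnd, u ≤ bnd := by
  unfold ub?
  rcases lt_trichotomy d 0 with hd | hd | hd
  · rw [if_neg (by omega), if_pos hd]
    simp only [Option.mem_def, Option.some.injEq, forall_eq']
    have : PySem.Int.floordiv (bnd - 1 - a) (-d) < bnd + 1 := by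
      rw [PySem.Int.floordiv_lt_iff_lt_mul (hb := by omega)]
      nlinarith [h1.1, h1.2]
    omega
  · subst hd; simp
  · rw [if_pos hd]
    simp only [Option.mem_def, Option.some.injEq, forall_eq']
    have : PySem.Int.floordiv a d < bnd + 1 := by
      rw [PySem.Int.floordiv_lt_iff_lt_mul (hb := hd)]
      nlinarith [h1.1, h1.2]
    omega

-- the fueled while loop collects exactly the prefix 1..K, given the interval characterisation
theorem whileA_loop (l1 l2 : Int × Int) (w h K : Int)
    (hiff : ∀ k : Int, 1 ≤ k →
      ((0 ≤ (rayPt l1 l2 k).1 ∧ (rayPt l1 l2 k).1 < w ∧ 0 ≤ (rayPt l1 l2 k).2 ∧ (rayPt l1 l2 k).2 < h) ↔ k ≤ K)) :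
    ∀ (fuel : Nat) (k : Int) (acc : List (Int × Int)), 1 ≤ k → k ≤ K + 1 → (K + 1 - k).toNat < fuel →
      whileA l1 l2 w h fuel k (rayPt l1 l2 k) acc
        = acc ++ (PySem.List.pyRange k (K + 1) 1).map (rayPt l1 l2) := by
  intro fuel
  induction fuel with
  | zero => intro k acc _ _ hf; omega
  | succ n ih =>
    intro k acc hk hk1 hf
    by_cases hke : k ≤ K
    · have hc := (hiff k hk).mpr hke
      have hnext : calcNext l1 l2 k = rayPt l1 l2 (k + 1) := rfl
      simp only [whileA, if_pos hc, hnext]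
      rw [ih (k+1) (acc ++ [rayPt l1 l2 k]) (by omega) (by omega) (by omega)]
      rw [PySem.List.pyRange_one_cons (by omega : k < K + 1)]
      simp
    · have hkk : k = K + 1 := by omega
      have hc : ¬ (0 ≤ (rayPt l1 l2 k).1 ∧ (rayPt l1 l2 k).1 < w ∧ 0 ≤ (rayPt l1 l2 k).2 ∧ (rayPt l1 l2 k).2 < h) := by
        rw [hiff k hk]; omega
      simp only [whileA, if_neg hc]
      rw [PySem.List.pyRange_one]
      simp [hkk]

-- one direction of A's helper equals B's closed form
theorem whileA_eq_rayB (l1 l2 : Int × Int) (w h : Int) (hne : l1 ≠ l2) (acc : List (Int × Int)) :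
    whileA l1 l2 w h (antinodeFuel w h) 1 (calcNext l1 l2 0) acc = acc ++ rayB l1 l2 w h := by
  have hP1 : calcNext l1 l2 0 = rayPt l1 l2 1 := by simp [calcNext, rayPt]
  by_cases hV : 0 ≤ l1.1 - (l1.1 - l2.1) ∧ l1.1 - (l1.1 - l2.1) < w ∧ 0 ≤ l1.2 - (l1.2 - l2.2) ∧ l1.2 - (l1.2 - l2.2) < h
  · -- the loop runs: closed-form interval
    have h1x : 0 ≤ l1.1 - (l1.1 - l2.1) ∧ l1.1 - (l1.1 - l2.1) < w := ⟨hV.1, hV.2.1⟩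
    have h1y : 0 ≤ l1.2 - (l1.2 - l2.2) ∧ l1.2 - (l1.2 - l2.2) < h := ⟨hV.2.2.1, hV.2.2.2⟩
    set dx := l1.1 - l2.1 with hdx
    set dy := l1.2 - l2.2 with hdy
    have hd0 : ¬ (dx = 0 ∧ dy = 0) := by
      rintro ⟨e1, e2⟩; exact hne (Prod.ext (by omega) (by omega))
    set ks : List Int := (ub? l1.1 dx w).toList ++ (ub? l1.2 dy h).toList with hks
    have hksne : ks ≠ [] := by
      intro hnil
      rw [hks, List.append_eq_nil_iff] at hnil
      obtain ⟨e1, e2⟩ := hnil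
      unfold ub? at e1 e2
      split_ifs at e1 e2 <;> simp_all
      all_goals omega
    obtain ⟨K, hK⟩ : ∃ K, PySem.List.min? ks (fun k => k) = some K := by
      rcases Option.eq_none_or_eq_some (PySem.List.min? ks (fun k => k)) with e | e
      · exact absurd ((PySem.List.min?_eq_none_iff ks (fun k => k)).mp e) hksne
      · exact e.choose_spec ▸ ⟨e.choose, rfl⟩
    have hmemks : ∀ u, u ∈ ks ↔ u ∈ ub? l1.1 dx w ∨ u ∈ ub? l1.2 dy h := by
      intro u; rw [hks]; simp [List.mem_append, Option.mem_toList]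
    have hiff : ∀ k : Int, 1 ≤ k →
        ((0 ≤ (rayPt l1 l2 k).1 ∧ (rayPt l1 l2 k).1 < w ∧ 0 ≤ (rayPt l1 l2 k).2 ∧ (rayPt l1 l2 k).2 < h) ↔ k ≤ K) := by
      intro k hk
      have cx := coord_iff l1.1 dx w k h1x hk
      have cy := coord_iff l1.2 dy h k h1y hk
      constructor
      · intro hc
        have hall : ∀ u ∈ ks, k ≤ u := by
          intro u hu
          rcases (hmemks u).mp hu with hu' | hu'
          · exact cx.mp ⟨hc.1, hc.2.1⟩ u hu'
          · exact cy.mp ⟨hc.2.2.1, hc.2.2.2⟩ u hu'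
        exact hall K (PySem.List.min?_mem hK)
      · intro hkK
        have hall : ∀ u ∈ ks, k ≤ u := fun u hu => le_trans hkK (PySem.List.min?_isMin hK u hu)
        have hx := cx.mpr (fun u hu => hall u ((hmemks u).mpr (Or.inl hu)))
        have hy := cy.mpr (fun u hu => hall u ((hmemks u).mpr (Or.inr hu)))
        exact ⟨hx.1, hx.2, hy.1, hy.2⟩
    have hKw : K ≤ w + h := by
      rcases (hmemks K).mp (PySem.List.min?_mem hK) with hu | hu
      · have := coord_ub_le l1.1 dx w h1x K hu
        omega
      · have := coord_ub_le l1.2 dy h h1y K hu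
        omega
    have hK1 : 1 ≤ K := (hiff 1 le_rfl).mp (by simp only [rayPt, mul_one]; exact hV)
    rw [hP1, whileA_loop l1 l2 w h K hiff (antinodeFuel w h) 1 acc le_rfl (by omega)
        (by simp only [antinodeFuel]; omega)]
    rw [rayB]
    simp only [if_pos hV, ← hdx, ← hdy, ← hks, hK]
    rfl
  · have h1 : antinodeFuel w h = (antinodeFuel w h - 1) + 1 := by simp [antinodeFuel]
    rw [h1, hP1]
    have : ¬ (0 ≤ (rayPt l1 l2 1).1 ∧ (rayPt l1 l2 1).1 < w ∧ 0 ≤ (rayPt l1 l2 1).2 ∧ (rayPt l1 l2 1).2 < h) := by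
      simpa [rayPt] using hV
    simp only [whileA, if_neg this]
    rw [rayB]
    simp only [if_neg hV, List.append_nil]

theorem antinode_eq (l1 l2 : Int × Int) (w h : Int) (hne : l1 ≠ l2) :
    calculate_antinode_location_part2 l1 l2 w h = rayB l1 l2 w h ++ rayB l2 l1 w h := by
  have h2 : l2 ≠ l1 := fun e => hne e.symm
  unfold calculate_antinode_location_part2
  rw [whileA_eq_rayB l1 l2 w h hne, whileA_eq_rayB l2 l1 w h h2]
  simp

-- "append if new", A's inline dedup step
def addIfNew (r : List (Int × Int)) (x : Int × Int) : List (Int × Int) :=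
  if x ∈ r then r else r ++ [x]

theorem dedup_eq_foldl_addIfNew (s : List (Int × Int)) :
    PySem.List.dedup s = s.foldl addIfNew [] := by
  rw [PySem.List.dedup_eq_ofList, PySem.Set.ofList_eq_foldl]
  congr 1
  funext r x
  simp [PySem.Set.add, PySem.Set.contains, addIfNew]

theorem foldl_flatMap {α β : Type} (g : α → List β) (f : List β → β → List β) :
    ∀ (xs : List α) (init : List β),
      (xs.flatMap g).foldl f init = xs.foldl (fun acc x => (g x).foldl f acc) init := by
  intro xs
  induction xs with
  | nil => intro init; rfl
  | cons x t ih => intro init; simp [List.flatMap_cons, List.foldl_append, ih]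

-- ===== VERDICT (by name: the statement is the Claim_ definition above) =====
theorem calculate_antinode_locations_part2_spec : Claim_equal_calculate_antinode_locations_part2 := by
  intro locations width height _
  unfold Spec_calculate_antinode_locations_part2 calculate_antinode_locations_part2_alt
  rw [dedup_eq_foldl_addIfNew]
  unfold streamB calculate_antinode_locations_part2
  rw [foldl_flatMap]
  congr 1
  funext acc l1
  simp only [List.foldl_cons]
  rw [foldl_flatMap]
  congr 1
  · funext a l2
    simp only [List.foldl_cons]
    by_cases he : l1 = l2
    · simp [he, addIfNew]
    · rw [antinode_eq l1 l2 width height he]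
      simp only [he, if_false, List.foldl_append]
      rfl
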